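-- pv_equiv track=rewrite | github.com/Gabrielvelozo/IP-UNGS-2024 | Practica -5 Listas/Ejercicio11.py | maximoEntre
-- ===== SOURCE A (Python) =====
-- def maximoEntre(lista,a,b):
--     maximoNumero=lista[a]
--     indice=a
--     for i in range(a,b+1):
--         if lista[i]>maximoNumero:
--             maximoNumero=lista[i]
--             indice=i
--     return indice
-- ===== SOURCE B (Python) =====
-- def maximoEntre(lista, a, b):
--     if b < a:
--         return a
--     m = max(lista[i] for i in range(a, b + 1))
--     return next(i for i in range(a, b + 1) if lista[i] == m)
-- ===== Notes on version B (the rewrite author's own statement) =====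
-- stated objective: simpler
-- what changed: Replaces the single tracking scan (running max value + running index) by a value-only decomposition: take max() over the subrange, then return the first index equal to it via next(); the empty range b<a is handled by an early return.
import Mathlib
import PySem

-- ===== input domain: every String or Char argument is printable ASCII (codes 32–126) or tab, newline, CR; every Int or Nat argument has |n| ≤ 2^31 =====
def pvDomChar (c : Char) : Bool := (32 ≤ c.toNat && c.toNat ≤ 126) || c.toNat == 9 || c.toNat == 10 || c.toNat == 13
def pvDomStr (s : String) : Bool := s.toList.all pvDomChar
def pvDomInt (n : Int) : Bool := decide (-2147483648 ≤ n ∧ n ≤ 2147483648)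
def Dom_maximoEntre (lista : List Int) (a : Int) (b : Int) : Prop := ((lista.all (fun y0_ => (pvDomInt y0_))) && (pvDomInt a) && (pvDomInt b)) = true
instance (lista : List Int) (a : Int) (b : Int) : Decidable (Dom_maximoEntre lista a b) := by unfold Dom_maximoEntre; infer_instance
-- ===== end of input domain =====

-- B replaces A's single scan tracking (max value, index) by a value-only decomposition:
-- max over the subrange, then first index equal to it (simpler; same cost).

-- ===== PORT A =====
-- literal port of A: single scan over range(a, b+1) keeping (maximoNumero, indice)
def maximoEntre (lista : List Int) (a : Int) (b : Int) : Int :=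
  let maximoNumero := (PySem.List.pyGet? lista a).getD 0
  let st := (PySem.List.pyRange a (b + 1) 1).foldl
    (fun (s : Int × Int) i =>
      if (PySem.List.pyGet? lista i).getD 0 > s.1
      then ((PySem.List.pyGet? lista i).getD 0, i) else s)
    (maximoNumero, a)
  st.2

-- ===== PORT B =====
-- port of Source B: early return for b < a, then max over the range's values, then
-- next(...) = first index whose value equals that max (find?; getD a is unreachable inside Pre_)
def maximoEntre_alt (lista : List Int) (a : Int) (b : Int) : Int :=
  if b < a then a
  else
    let vals := (PySem.List.pyRange a (b + 1) 1).map
      (fun i => (PySem.List.pyGet? lista i).getD 0)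
    let m := vals.foldl max (vals.headD 0)
    ((PySem.List.pyRange a (b + 1) 1).find?
      (fun i => (PySem.List.pyGet? lista i).getD 0 == m)).getD a

-- ===== PRECONDITION & SPEC =====
-- exactly the inputs where Python A returns: index a valid (Python negative indexing
-- allowed), and if the loop is nonempty (a ≤ b) every visited index i ≤ b is valid too
def Pre_maximoEntre (lista : List Int) (a : Int) (b : Int) : Prop :=
  (-(lista.length : Int) ≤ a ∧ a < (lista.length : Int)) ∧
  (b < a ∨ b < (lista.length : Int))
instance (lista : List Int) (a : Int) (b : Int) : Decidable (Pre_maximoEntre lista a b) := by unfold Pre_maximoEntre; infer_instance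
def pvWitness_maximoEntre : List Int × Int × Int := ([3, 7, 7, 1], 1, 3)

def Spec_maximoEntre (lista : List Int) (a : Int) (b : Int) (out : Int) : Prop := out = maximoEntre_alt lista a b
instance (lista : List Int) (a : Int) (b : Int) (out : Int) : Decidable (Spec_maximoEntre lista a b out) := by unfold Spec_maximoEntre; infer_instance

-- ===== CLAIM (what is proved, stated in full; the proofs are below) =====
def Claim_equal_maximoEntre : Prop := ∀ (lista : List Int) (a : Int) (b : Int), Dom_maximoEntre lista a b → Pre_maximoEntre lista a b → Spec_maximoEntre lista a b (maximoEntre lista a b)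

-- ===== LEMMAS AND PROOFS =====

-- the running max only grows
theorem le_foldl_max (g : Int → Int) :
    ∀ (L : List Int) (m : Int), m ≤ L.foldl (fun acc i => max acc (g i)) m := by
  intro L
  induction L with
  | nil => intro m; simp
  | cons i t ih =>
    intro m
    simpa [List.foldl] using le_trans (le_max_left m (g i)) (ih (max m (g i)))

-- the fold max is its seed or is attained by some element
theorem foldl_max_attained (g : Int → Int) :
    ∀ (t : List Int) (c : Int),
      t.foldl (fun acc i => max acc (g i)) c = c ∨
      ∃ x ∈ t, g x = t.foldl (fun acc i => max acc (g i)) c := by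
  intro t
  induction t with
  | nil => intro c; left; rfl
  | cons y s ih =>
    intro c
    rcases ih (max c (g y)) with h1 | h2
    · simp only [List.foldl]
      rcases max_cases c (g y) with ⟨h2, _⟩ | ⟨h2, _⟩
      · left; rw [h1, h2]
      · right; exact ⟨y, by simp, by rw [h1, h2]⟩
    · right; obtain ⟨x, hx, hgx⟩ := h2
      exact ⟨x, List.mem_cons_of_mem _ hx, by simpa [List.foldl] using hgx⟩

-- A's fold returns the first index attaining the overall max when it exceeds the seed, else the seed index
theorem fold2 (g : Int → Int) :
    ∀ (L : List Int) (m j : Int),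
      (L.foldl (fun (s : Int × Int) i => if g i > s.1 then (g i, i) else s) (m, j)).2 =
        if m < L.foldl (fun acc i => max acc (g i)) m then
          ((L.find? (fun i => g i == L.foldl (fun acc i => max acc (g i)) m)).getD j)
        else j := by
  intro L
  induction L with
  | nil => intro m j; simp
  | cons i t ih =>
    intro m j
    simp only [List.foldl]
    by_cases h : g i > m
    · rw [if_pos h]
      have hmax : max m (g i) = g i := max_eq_right (le_of_lt h)
      rw [hmax]
      have hgeM : g i ≤ t.foldl (fun acc i => max acc (g i)) (g i) := le_foldl_max g t (g i)
      have hM : m < t.foldl (fun acc i => max acc (g i)) (g i) := lt_of_lt_of_le h hgeM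
      rw [if_pos hM, ih (g i) i]
      by_cases he : g i = t.foldl (fun acc i => max acc (g i)) (g i)
      · have h1 : ¬ g i < t.foldl (fun acc i => max acc (g i)) (g i) := by omega
        rw [if_neg h1, List.find?_cons_of_pos (by simpa using he)]
        simp
      · have hlt : g i < t.foldl (fun acc i => max acc (g i)) (g i) := lt_of_le_of_ne hgeM he
        rw [if_pos hlt, List.find?_cons_of_neg (by simpa using he)]
        rcases foldl_max_attained g t (g i) with h1 | ⟨x, hx, hgx⟩
        · exact absurd h1.symm he
        · cases hfind : t.find? (fun i' => g i' == t.foldl (fun acc i => max acc (g i)) (g i)) with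
          | none =>
            have := List.find?_eq_none.mp hfind x hx
            exact absurd (by simpa using hgx) (by simpa using this)
          | some x' => simp
    · rw [if_neg h]
      have hmax : max m (g i) = m := max_eq_left (by omega)
      rw [hmax, ih m j]
      by_cases hlt : m < t.foldl (fun acc i => max acc (g i)) m
      · have hne : ¬ (g i = t.foldl (fun acc i => max acc (g i)) m) := by omega
        rw [if_pos hlt, if_pos hlt, List.find?_cons_of_neg (by simpa using hne)]
      · rw [if_neg hlt, if_neg hlt]

-- B's max over mapped values equals A's fold-over-indices max (same seed)
theorem foldl_max_map (g : Int → Int) (L : List Int) (c : Int) :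
    (L.map g).foldl max c = L.foldl (fun acc i => max acc (g i)) c := by
  rw [List.foldl_map]

-- ===== VERDICT (by name: the statement is the Claim_ definition above) =====
theorem maximoEntre_spec : Claim_equal_maximoEntre := by
  intro lista a b _ _
  unfold Spec_maximoEntre maximoEntre maximoEntre_alt
  by_cases hab : b < a
  · have : PySem.List.pyRange a (b + 1) 1 = [] :=
      PySem.List.pyRange_one_eq_nil (by omega)
    simp [this, hab]
  · have hlt : a < b + 1 := by omega
    rw [PySem.List.pyRange_one_cons hlt, if_neg hab]
    simp only [List.foldl, List.map_cons, List.headD_cons, List.foldl_cons, max_self,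
      lt_irrefl, reduceIte, gt_iff_lt]
    rw [foldl_max_map, fold2 (fun i => (PySem.List.pyGet? lista i).getD 0)]
    by_cases hcase : (PySem.List.pyGet? lista a).getD 0 <
        (PySem.List.pyRange (a + 1) (b + 1) 1).foldl
          (fun acc i => max acc ((PySem.List.pyGet? lista i).getD 0))
          ((PySem.List.pyGet? lista a).getD 0)
    · rw [if_pos hcase, List.find?_cons_of_neg (by simp; omega)]
    · have hMeq : (PySem.List.pyRange (a + 1) (b + 1) 1).foldl
          (fun acc i => max acc ((PySem.List.pyGet? lista i).getD 0))
          ((PySem.List.pyGet? lista a).getD 0) = (PySem.List.pyGet? lista a).getD 0 := by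
        have := le_foldl_max (fun i => (PySem.List.pyGet? lista i).getD 0)
          (PySem.List.pyRange (a + 1) (b + 1) 1) ((PySem.List.pyGet? lista a).getD 0)
        omega
      rw [if_neg hcase, List.find?_cons_of_pos (by simp [hMeq])]
      simp
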